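-- pv_equiv track=rewrite | github.com/Tulpana/ARC-AGI-2 | arc_agi_2_submission/ril/solver.py | _detect_color_mapping_pairs
-- ===== SOURCE A (Python) =====
-- from typing import Iterable, List, Dict, Tuple, Any, Optional, Sequence, Set, Mapping
-- from collections import Counter, deque
--
-- def _detect_color_mapping_pairs(pair_lists: List[List[Tuple[int,int]]]) -> Dict[int,int]:
--     """Map each input color to most frequent output color seen in sampled pairs."""
--     freq: Dict[int, Counter] = {}
--     for pairs in pair_lists:
--         for a,b in pairs:
--             freq.setdefault(a, Counter()).update([b])
--     mapping = {}
--     for a, cnts in freq.items():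
--         outc, n = cnts.most_common(1)[0]
--         # require some minimum dominance to avoid noise
--         if n >= 2 or len(cnts) == 1:
--             mapping[a] = outc
--     return mapping
-- ===== SOURCE B (Python) =====
-- def _detect_color_mapping_pairs(pair_lists):
--     """Map each input color to most frequent output color seen in sampled pairs."""
--     flat = [p for pairs in pair_lists for p in pairs]
--     out = {}
--     for a in dict.fromkeys(x for x, _ in flat):
--         bs = [b for x, b in flat if x == a]
--         best, n = max(((b, bs.count(b)) for b in dict.fromkeys(bs)), key=lambda t: t[1])
--         if n >= 2 or len(set(bs)) == 1:
--             out[a] = best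
--     return out
-- ===== Notes on version B (the rewrite author's own statement) =====
-- stated objective: alternative
-- what changed: Replaces the two-phase dict-of-Counters aggregation by a flatten-then-group-by recomputation: flatten all pairs once, then for each distinct input color filter its outputs and pick the first most-common output by direct counting; no nested dict/Counter state is maintained (it trades the single-pass counting structure for per-color recomputation).
import Mathlib
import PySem

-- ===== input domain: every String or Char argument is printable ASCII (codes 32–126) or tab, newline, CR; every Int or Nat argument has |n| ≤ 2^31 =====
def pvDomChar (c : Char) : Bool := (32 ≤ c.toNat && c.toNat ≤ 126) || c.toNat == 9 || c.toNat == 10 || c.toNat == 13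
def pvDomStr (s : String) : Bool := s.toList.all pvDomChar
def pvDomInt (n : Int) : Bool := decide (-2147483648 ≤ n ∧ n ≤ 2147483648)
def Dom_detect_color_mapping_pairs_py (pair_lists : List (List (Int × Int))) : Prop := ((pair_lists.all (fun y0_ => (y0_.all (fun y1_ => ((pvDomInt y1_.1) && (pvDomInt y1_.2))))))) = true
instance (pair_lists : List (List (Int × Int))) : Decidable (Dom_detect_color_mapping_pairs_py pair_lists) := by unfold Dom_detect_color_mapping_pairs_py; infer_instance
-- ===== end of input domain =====

-- B replaces A's dict-of-Counters aggregation by a flatten-then-group-by recomputation (alternative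
-- decomposition, similar size, not claimed faster); return values proved equal on the whole domain.

-- ===== PORT A =====
-- loop body of A's counting phase: freq.setdefault(a, Counter()).update([b])
def aStep (d : PySem.Dict Int (PySem.Dict Int Int)) (p : Int × Int) : PySem.Dict Int (PySem.Dict Int Int) :=
  d.modify p.1 PySem.Dict.empty (fun c => c.modify p.2 0 (· + 1))

def detect_color_mapping_pairs_py (pair_lists : List (List (Int × Int))) : List (Int × Int) :=
  let freq : PySem.Dict Int (PySem.Dict Int Int) :=
    pair_lists.foldl (fun d pairs => pairs.foldl aStep d) PySem.Dict.empty
  let mapping : PySem.Dict Int Int :=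
    freq.items.foldl (fun m q =>
      -- cnts.most_common(1)[0] = first item of maximal count (raises on an empty counter — never reached,
      -- every counter in freq was created with at least one update; the `none` case is that dead branch)
      (PySem.List.max? q.2.items (fun r => r.2)).elim m
        (fun r => if r.2 ≥ 2 ∨ q.2.size = 1 then m.insert q.1 r.1 else m))
      PySem.Dict.empty
  mapping.items

-- ===== PORT B =====
def detect_color_mapping_pairs_py_alt (pair_lists : List (List (Int × Int))) : List (Int × Int) :=
  let flat := pair_lists.flatten
  (PySem.List.dedup (flat.map (·.1))).foldl (fun out a =>
    let bs := (flat.filter (fun p => p.1 == a)).map (·.2)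
    -- max(..., key=...) = first maximal; bs is nonempty for every a, the `none` case is a dead branch
    (PySem.List.max? ((PySem.List.dedup bs).map (fun b => (b, (bs.count b : Int)))) (fun t => t.2)).elim out
      (fun r => if r.2 ≥ 2 ∨ (PySem.Set.ofList bs).length = 1 then out ++ [(a, r.1)] else out)) []

-- ===== PRECONDITION & SPEC =====
def Spec_detect_color_mapping_pairs_py (pair_lists : List (List (Int × Int))) (out : List (Int × Int)) : Prop := out = detect_color_mapping_pairs_py_alt pair_lists
instance (pair_lists : List (List (Int × Int))) (out : List (Int × Int)) : Decidable (Spec_detect_color_mapping_pairs_py pair_lists out) := by unfold Spec_detect_color_mapping_pairs_py; infer_instance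

-- ===== CLAIM (what is proved, stated in full; the proofs are below) =====
def Claim_equal_detect_color_mapping_pairs_py : Prop := ∀ (pair_lists : List (List (Int × Int))), Dom_detect_color_mapping_pairs_py pair_lists → Spec_detect_color_mapping_pairs_py pair_lists (detect_color_mapping_pairs_py pair_lists)

-- ===== LEMMAS AND PROOFS =====

-- the outputs seen for input color a, in order (shared vocabulary of the proofs)
def bsOf (flat : List (Int × Int)) (a : Int) : List Int :=
  (flat.filter (fun p => p.1 == a)).map (·.2)

-- the per-color winner: first maximal-count (output, count) item
def gOf (flat : List (Int × Int)) (a : Int) : Int × Int :=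
  (PySem.List.max? ((PySem.Dict.counter (bsOf flat a) : PySem.Dict Int Int).items) (fun r => r.2)).getD (0, 0)

lemma getD_foldl_aStep (l : List (Int × Int)) (a : Int) :
    ∀ d, (l.foldl aStep d).getD a PySem.Dict.empty
      = (bsOf l a).foldl (fun c b => c.modify b 0 (· + 1)) (d.getD a PySem.Dict.empty) := by
  induction l with
  | nil => intro d; simp [bsOf]
  | cons p l ih =>
    intro d
    simp only [List.foldl_cons, ih, bsOf, List.filter_cons]
    by_cases h : p.1 = a
    · simp [h, aStep]
    · have hb : (p.1 == a) = false := by simpa using h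
      simp [hb, aStep, PySem.Dict.getD_modify, Ne.symm h]

lemma getD_freq (flat : List (Int × Int)) (a : Int) :
    (flat.foldl aStep PySem.Dict.empty).getD a PySem.Dict.empty
      = PySem.Dict.counter (bsOf flat a) := by
  rw [getD_foldl_aStep, PySem.Dict.getD_empty, PySem.Dict.counter_eq_foldl]

lemma keys_freq (flat : List (Int × Int)) :
    (flat.foldl aStep PySem.Dict.empty).keys = PySem.Set.ofList (flat.map (·.1)) := by
  have h := PySem.Dict.keys_foldl_modify_key (l := flat) (key := fun p : Int × Int => p.1)
    (d0 := (PySem.Dict.empty : PySem.Dict Int Int))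
    (f := fun _ p => fun c => c.modify p.2 0 (· + 1)) (d := PySem.Dict.empty)
  simpa [aStep, PySem.Set.update, PySem.Set.ofList_eq_foldl] using h

lemma nodup_keys_freq (flat : List (Int × Int)) :
    (flat.foldl aStep PySem.Dict.empty).keys.Nodup := by
  rw [keys_freq]; exact PySem.Set.nodup_ofList _

lemma counter_size (bs : List Int) :
    (PySem.Dict.counter (κ := Int) bs).size = (PySem.Set.ofList bs).length := by
  simp [PySem.Dict.size, PySem.Dict.items_counter]

lemma bsOf_ne_nil (flat : List (Int × Int)) (a : Int)
    (ha : a ∈ PySem.Set.ofList (flat.map (·.1))) : bsOf flat a ≠ [] := by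
  rw [PySem.Set.mem_ofList] at ha
  obtain ⟨p, hp, hpa⟩ := List.mem_map.mp ha
  have : p ∈ flat.filter (fun p => p.1 == a) := by
    refine List.mem_filter.mpr ⟨hp, ?_⟩; simpa using hpa
  intro h
  unfold bsOf at h
  rw [List.map_eq_nil_iff.mp h] at this
  simp at this

lemma max?_counter_some (flat : List (Int × Int)) (a : Int)
    (ha : a ∈ PySem.Set.ofList (flat.map (·.1))) :
    PySem.List.max? ((PySem.Dict.counter (bsOf flat a) : PySem.Dict Int Int).items) (fun r => r.2)
      = some (gOf flat a) := by
  have hne : (PySem.Dict.counter (bsOf flat a) : PySem.Dict Int Int).items ≠ [] := by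
    rw [PySem.Dict.items_counter]
    intro h
    have hb : bsOf flat a ≠ [] := bsOf_ne_nil flat a ha
    rcases List.exists_mem_of_ne_nil _ hb with ⟨b, hbmem⟩
    have : b ∈ PySem.Set.ofList (bsOf flat a) := (PySem.Set.mem_ofList _ _).mpr hbmem
    rw [List.map_eq_nil_iff.mp h] at this
    exact (List.not_mem_nil) this
  cases hr : PySem.List.max? ((PySem.Dict.counter (bsOf flat a) : PySem.Dict Int Int).items) (fun r => r.2) with
  | none => exact absurd ((PySem.List.max?_eq_none_iff _ _).mp hr) hne
  | some r => simp [gOf, hr]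

lemma main_eq (pl : List (List (Int × Int))) :
    detect_color_mapping_pairs_py pl = detect_color_mapping_pairs_py_alt pl := by
  unfold detect_color_mapping_pairs_py detect_color_mapping_pairs_py_alt
  simp only [← List.foldl_flatten]
  set flat := pl.flatten with hf
  set keys := PySem.Set.ofList (flat.map (·.1)) with hkeys
  -- A's freq.items is keys paired with the per-color counters
  have hitems : (flat.foldl aStep PySem.Dict.empty).items
      = keys.map (fun a => (a, PySem.Dict.counter (bsOf flat a))) := by
    rw [PySem.Dict.items_eq_map_keys _ (nodup_keys_freq flat) PySem.Dict.empty, keys_freq]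
    exact List.map_congr_left (fun a _ => by rw [getD_freq])
  rw [hitems, List.foldl_map]
  have hbs : ∀ a : Int, (List.filter (fun p => p.1 == a) flat).map (fun x : Int × Int => x.2) = bsOf flat a :=
    fun _ => rfl
  simp only [PySem.List.dedup_eq_ofList, ← hkeys, ← PySem.Dict.items_counter, hbs]
  -- both folds over keys compute the same per-color decision; normalise each step via gOf
  set cond : Int → Bool :=
    fun a => decide ((gOf flat a).2 ≥ 2 ∨ (PySem.Set.ofList (bsOf flat a)).length = 1) with hcond
  set val : Int → Int := fun a => (gOf flat a).1 with hval
  have hstepA : ∀ (m : PySem.Dict Int Int), ∀ a ∈ keys,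
      ((PySem.List.max? ((PySem.Dict.counter (bsOf flat a) : PySem.Dict Int Int).items) (fun r => r.2)).elim m
        (fun r => if r.2 ≥ 2 ∨ (PySem.Dict.counter (bsOf flat a) : PySem.Dict Int Int).size = 1
           then m.insert a r.1 else m))
      = if cond a then m.insert a (val a) else m := by
    intro m a hmem
    rw [max?_counter_some flat a hmem, counter_size]
    by_cases hc : (gOf flat a).2 ≥ 2 ∨ (PySem.Set.ofList (bsOf flat a)).length = 1 <;>
      simp [hc, hcond, hval]
  have hstepB : ∀ (out : List (Int × Int)), ∀ a ∈ keys,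
      ((PySem.List.max? ((PySem.Dict.counter (bsOf flat a) : PySem.Dict Int Int).items) (fun r => r.2)).elim out
        (fun r => if r.2 ≥ 2 ∨ (PySem.Set.ofList (bsOf flat a)).length = 1
           then out ++ [(a, r.1)] else out))
      = if cond a then out ++ [(a, val a)] else out := by
    intro out a hmem
    rw [max?_counter_some flat a hmem]
    by_cases hc : (gOf flat a).2 ≥ 2 ∨ (PySem.Set.ofList (bsOf flat a)).length = 1 <;>
      simp [hc, hcond, hval]
  rw [PySem.List.foldl_congr_mem _ _ _ _ hstepA, PySem.List.foldl_congr_mem _ _ _ _ hstepB]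
  rw [PySem.List.foldl_if_eq_foldl_filter cond
        (fun (m : PySem.Dict Int Int) a => m.insert a (val a)) keys PySem.Dict.empty,
      PySem.List.foldl_append_if cond (fun a => (a, val a)) keys []]
  rw [PySem.Dict.items_foldl_insert_fresh (keys.filter cond) (fun a => a) val PySem.Dict.empty
        (by intro a _; simp)
        (by simpa using ((PySem.Set.nodup_ofList (flat.map (·.1))).filter cond))]
  simp
  rfl

-- ===== VERDICT (by name: the statement is the Claim_ definition above) =====
theorem detect_color_mapping_pairs_py_spec : Claim_equal_detect_color_mapping_pairs_py := by
  intro pl _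
  unfold Spec_detect_color_mapping_pairs_py
  exact main_eq pl
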